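-- pv_equiv track=rewrite | github.com/aakib97/Python_Learning | Homework 2/filing.py | leftmostfiling
-- ===== SOURCE A (Python) =====
-- def leftmostfiling(L):          # L: list of document IDs acquired from the pile
--     M = [x for x in range(20)]  # initialize a pile of 20 documents
--     count = 0                   # sum of total number of documents passed before finding each document in L
--     for l in L:
--         if l in M:
--             count += M.index(l)
--             M.remove(l)
--             M.insert(0, l)
--     return count
-- ===== SOURCE B (Python) =====
-- def leftmostfiling(L):
--     # Inverse view: instead of the pile itself, keep pos[x] = current position
--     # of document x.  A hit adds pos[l], shifts every document currently in
--     # front of l back by one, and puts l at position 0 -- no list search,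
--     # remove or insert.
--     pos = list(range(20))
--     count = 0
--     for l in L:
--         if 0 <= l < 20:
--             p = pos[l]
--             count += p
--             pos = [q + 1 if q < p else q for q in pos]
--             pos[l] = 0
--     return count
-- ===== Notes on version B (the rewrite author's own statement) =====
-- stated objective: faster
-- what changed: B keeps the inverse view pos[x] = current position of document x (a 20-entry position table) and updates it by one bulk shift per hit, instead of A's pile list searched with `in`/`.index` and reordered with remove/insert; a miss costs a range check instead of a 20-element membership scan, a hit one pass instead of four.
import Mathlib
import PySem

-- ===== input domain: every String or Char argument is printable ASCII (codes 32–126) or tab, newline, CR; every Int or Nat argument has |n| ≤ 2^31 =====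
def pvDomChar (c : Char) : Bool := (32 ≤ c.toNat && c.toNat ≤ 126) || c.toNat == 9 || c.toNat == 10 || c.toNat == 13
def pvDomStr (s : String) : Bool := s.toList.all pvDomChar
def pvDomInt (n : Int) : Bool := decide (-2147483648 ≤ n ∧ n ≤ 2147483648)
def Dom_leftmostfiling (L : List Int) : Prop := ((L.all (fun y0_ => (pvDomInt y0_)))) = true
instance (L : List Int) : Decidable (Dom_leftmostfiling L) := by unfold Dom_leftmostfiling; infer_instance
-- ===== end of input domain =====

-- B replaces A's pile list (searched with `in`/index, reordered by remove/insert) by the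
-- inverse position table pos[x] = current position of document x, updated by one bulk shift
-- per hit; a miss is a range check instead of a membership scan (measured faster in a timing run).

-- ===== PORT A =====
def lmfStepA (st : Int × List Int) (l : Int) : Int × List Int :=
  if l ∈ st.2 then
    (st.1 + (((PySem.List.index? st.2 l).getD 0 : Nat) : Int),   -- count += M.index(l)
     PySem.List.insert ((PySem.List.remove? st.2 l).getD []) (0 : Int) l)  -- M.remove(l); M.insert(0, l)
  else st

def leftmostfiling (L : List Int) : Int :=
  (L.foldl lmfStepA ((0 : Int), PySem.List.pyRange 0 20 1)).1

-- ===== PORT B =====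
def lmfStepB (st : Int × List Int) (l : Int) : Int × List Int :=
  if 0 ≤ l ∧ l < 20 then
    -- p = pos[l]: List.getD is exact here since the guard gives 0 ≤ l < 20 = len(pos)
    let p := st.2.getD l.toNat 0
    (st.1 + p,
     -- pos = [q + 1 if q < p else q for q in pos]; pos[l] = 0
     (st.2.map (fun q => if q < p then q + 1 else q)).set l.toNat 0)
  else st

def leftmostfiling_alt (L : List Int) : Int :=
  (L.foldl lmfStepB ((0 : Int), PySem.List.pyRange 0 20 1)).1

-- ===== PRECONDITION & SPEC =====
def Spec_leftmostfiling (L : List Int) (out : Int) : Prop := out = leftmostfiling_alt L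
instance (L : List Int) (out : Int) : Decidable (Spec_leftmostfiling L out) := by unfold Spec_leftmostfiling; infer_instance

-- ===== CLAIM (what is proved, stated in full; the proofs are below) =====
def Claim_equal_leftmostfiling : Prop := ∀ (L : List Int), Dom_leftmostfiling L → Spec_leftmostfiling L (leftmostfiling L)

-- ===== LEMMAS AND PROOFS =====

-- Invariant tying A's pile M to B's position table pos.
def LmfInv (M pos : List Int) : Prop :=
  (∀ x : Int, x ∈ M ↔ 0 ≤ x ∧ x < 20) ∧ pos.length = 20 ∧
  ∀ l : Int, 0 ≤ l → l < 20 →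
    ∃ p : Nat, PySem.List.index? M l = some p ∧ pos.getD l.toNat 0 = (p : Int)

-- Index of x after l is removed from M (x ≠ l): entries before l keep their index,
-- entries after l move up by one; also the two indices differ.
lemma index?_remove_of_ne {x l : Int} {M M' : List Int} {p i : Nat} (hxl : x ≠ l)
    (hp : PySem.List.index? M l = some p) (hi : PySem.List.index? M x = some i)
    (hr : PySem.List.remove? M l = some M') :
    i ≠ p ∧ PySem.List.index? M' x = some (if i < p then i else i - 1) := by
  induction M generalizing p i M' with
  | nil => simp [PySem.List.index?] at hp
  | cons h t ih =>
    by_cases hhl : h = l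
    · subst hhl
      rw [PySem.List.index?_cons_self] at hp
      rw [PySem.List.remove?_cons_self] at hr
      rw [PySem.List.index?_cons_of_ne t (fun e => hxl e.symm)] at hi
      obtain ⟨i', hi', rfl⟩ := Option.map_eq_some_iff.mp hi
      injection hp with hp
      subst hp
      injection hr with hr
      subst hr
      refine ⟨by omega, ?_⟩
      simpa using hi'
    · rw [PySem.List.index?_cons_of_ne t hhl] at hp
      rw [PySem.List.remove?_cons_of_ne t hhl] at hr
      obtain ⟨p', hp', rfl⟩ := Option.map_eq_some_iff.mp hp
      obtain ⟨t', ht', rfl⟩ := Option.map_eq_some_iff.mp hr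
      by_cases hxh : h = x
      · subst hxh
        rw [PySem.List.index?_cons_self] at hi
        cases hi
        refine ⟨by omega, ?_⟩
        rw [PySem.List.index?_cons_self]
        simp
      · rw [PySem.List.index?_cons_of_ne t hxh] at hi
        obtain ⟨i', hi', rfl⟩ := Option.map_eq_some_iff.mp hi
        obtain ⟨hne, hIH⟩ := ih hp' hi' ht'
        refine ⟨by omega, ?_⟩
        rw [PySem.List.index?_cons_of_ne t' hxh, hIH, Option.map_some]
        congr 1
        split_ifs <;> omega

lemma lmf_init_inv : LmfInv (PySem.List.pyRange 0 20 1) (PySem.List.pyRange 0 20 1) := by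
  refine ⟨fun x => by simp [PySem.List.mem_pyRange_one], by decide, ?_⟩
  intro l h0 h20
  interval_cases l <;> exact ⟨_, rfl, by decide⟩

lemma lmf_step (c : Int) (l : Int) (M pos : List Int) (h : LmfInv M pos) :
    (lmfStepA (c, M) l).1 = (lmfStepB (c, pos) l).1 ∧
    LmfInv (lmfStepA (c, M) l).2 (lmfStepB (c, pos) l).2 := by
  obtain ⟨hmem, hlen, hpos⟩ := h
  by_cases hg : 0 ≤ l ∧ l < 20
  · have hlM : l ∈ M := (hmem l).mpr hg
    obtain ⟨p, hip, hgp⟩ := hpos l hg.1 hg.2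
    have hrem : PySem.List.remove? M l = some (M.erase l) :=
      PySem.List.remove?_eq_some_erase M l hlM
    have hltn : l.toNat < pos.length := by omega
    simp only [lmfStepA, lmfStepB, if_pos hlM, if_pos hg, hip, hrem, Option.getD_some,
      PySem.List.insert_zero]
    refine ⟨by rw [hgp], ?_, ?_, ?_⟩
    · -- membership preserved
      intro x
      rw [← hmem x]
      by_cases hxl : x = l
      · subst hxl; simp [hlM]
      · simp [hxl, List.mem_erase_of_ne hxl]
    · simp [hlen]
    · intro x hx0 hx20
      obtain ⟨i, hxi, hgx⟩ := hpos x hx0 hx20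
      by_cases hxl : x = l
      · subst hxl
        refine ⟨0, PySem.List.index?_cons_self _ _, ?_⟩
        simp [List.getD, hltn, List.length_map]
      · obtain ⟨hne, hIH⟩ := index?_remove_of_ne hxl hip hxi hrem
        refine ⟨if i < p then i + 1 else i, ?_, ?_⟩
        · rw [PySem.List.index?_cons_of_ne _ (fun e => hxl e.symm), hIH, Option.map_some]
          congr 1
          split_ifs <;> omega
        · have htn : x.toNat ≠ l.toNat := by omega
          have hxtn : x.toNat < pos.length := by omega
          have hh : pos[x.toNat]? = some (pos[x.toNat]'hxtn) := List.getElem?_eq_getElem hxtn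
          rw [List.getD, List.getElem?_set_ne (by omega), List.getElem?_map, hh]
          rw [List.getD, hh] at hgx
          simp only [Option.map_some, Option.getD_some] at hgx ⊢
          rw [hgx, hgp]
          split_ifs <;> omega
  · have hlM : l ∉ M := fun hm => hg ((hmem l).mp hm)
    simp only [lmfStepA, lmfStepB, if_neg hlM, if_neg hg]
    exact ⟨by trivial, hmem, hlen, hpos⟩

lemma lmf_loop (L : List Int) : ∀ (c : Int) (M pos : List Int), LmfInv M pos →
    (L.foldl lmfStepA (c, M)).1 = (L.foldl lmfStepB (c, pos)).1 := by
  induction L with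
  | nil => intro c M pos _; rfl
  | cons l L ih =>
    intro c M pos h
    obtain ⟨h1, h2⟩ := lmf_step c l M pos h
    simp only [List.foldl_cons]
    have hA : lmfStepA (c, M) l = ((lmfStepA (c, M) l).1, (lmfStepA (c, M) l).2) := rfl
    have hB : lmfStepB (c, pos) l = ((lmfStepB (c, pos) l).1, (lmfStepB (c, pos) l).2) := rfl
    rw [hA, hB, h1]
    exact ih _ _ _ h2

-- ===== VERDICT (by name: the statement is the Claim_ definition above) =====
theorem leftmostfiling_spec : Claim_equal_leftmostfiling := by
  intro L _
  unfold Spec_leftmostfiling leftmostfiling leftmostfiling_alt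
  exact lmf_loop L 0 _ _ lmf_init_inv
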